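-- pv_equiv track=rewrite | github.com/vivekvjyn/augsvar | lib/pitch.py | segment_nones
-- ===== SOURCE A (Python) =====
-- def segment_nones(pitch):
--
--     segments_ix = []
--     this_segment = []
--     start = True
--     for i,p in enumerate(pitch):
--         if start == True and p:
--             this_segment.append(i)
--             start = False
--         if start == False and not p:
--             this_segment.append(i)
--             segments_ix.append(this_segment)
--             start = True
--             this_segment = []
--
--     return segments_ix
-- ===== SOURCE B (Python) =====
-- def segment_nones(pitch):
--     out = []
--     n = len(pitch)
--     i = 0
--     while i < n:
--         if pitch[i]:
--             j = i + 1
--             while j < n and pitch[j]: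
--                 j += 1
--             if j < n:
--                 out.append([i, j])
--             i = j + 1
--         else:
--             i += 1
--     return out
-- ===== Notes on version B (the rewrite author's own statement) =====
-- stated objective: alternative
-- what changed: Replaced the flag-driven single pass that toggles a 'start' state and accumulates a partial segment with a two-pointer run scanner: find the start of each truthy run, advance a second pointer to its end, and emit the pair only when the run is terminated by a falsy element.
import Mathlib
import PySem

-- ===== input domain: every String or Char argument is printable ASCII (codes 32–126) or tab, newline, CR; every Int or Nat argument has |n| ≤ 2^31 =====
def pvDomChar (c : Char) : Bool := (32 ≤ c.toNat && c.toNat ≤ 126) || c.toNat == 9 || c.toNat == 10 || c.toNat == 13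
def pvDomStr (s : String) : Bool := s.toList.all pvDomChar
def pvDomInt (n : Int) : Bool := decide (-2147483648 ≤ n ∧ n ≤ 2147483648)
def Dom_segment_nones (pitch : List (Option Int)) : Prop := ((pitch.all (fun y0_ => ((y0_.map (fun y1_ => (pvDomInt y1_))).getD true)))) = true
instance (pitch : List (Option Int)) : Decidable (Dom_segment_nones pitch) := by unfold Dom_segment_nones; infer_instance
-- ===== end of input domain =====

-- B replaces A's flag-driven accumulator pass with a two-pointer run scanner (alternative decomposition, same O(n) cost).


-- Python truthiness of an Optional[int]: None and 0 are falsy.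
def pvTruthy : Option Int → Bool
  | none => false
  | some x => x != 0

-- ===== PORT A =====
-- one iteration of A's for-loop body: state = (segments_ix, this_segment, start)
def pvStepA (s : List (List Int) × List Int × Bool) (ip : Int × Option Int) :
    List (List Int) × List Int × Bool :=
  let segs := s.1
  let seg := s.2.1
  let start := s.2.2
  let (seg, start) :=
    if start = true && pvTruthy ip.2 then (seg ++ [ip.1], false) else (seg, start)
  if start = false && !pvTruthy ip.2 then (segs ++ [seg ++ [ip.1]], ([] : List Int), true)
  else (segs, seg, start)

def segment_nones (pitch : List (Option Int)) : List (List Int) :=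
  ((PySem.List.enumerate pitch 0).foldl pvStepA ([], [], true)).1

-- ===== PORT B =====
-- mutual run scanner: outer looks for the start of a truthy run at index i,
-- inner advances j to the end of the run started at i0 and emits [i0, j] only if terminated
mutual
def pvAltOuter : List (Option Int) → Int → List (List Int)
  | [], _ => []
  | p :: rest, i => if pvTruthy p then pvAltInner rest (i + 1) i else pvAltOuter rest (i + 1)

def pvAltInner : List (Option Int) → Int → Int → List (List Int)
  | [], _, _ => []
  | p :: rest, j, i0 =>
      if pvTruthy p then pvAltInner rest (j + 1) i0 else [i0, j] :: pvAltOuter rest (j + 1)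
end

def segment_nones_alt (pitch : List (Option Int)) : List (List Int) :=
  pvAltOuter pitch 0

-- ===== PRECONDITION & SPEC =====
def Spec_segment_nones (pitch : List (Option Int)) (out : List (List Int)) : Prop := out = segment_nones_alt pitch
instance (pitch : List (Option Int)) (out : List (List Int)) : Decidable (Spec_segment_nones pitch out) := by unfold Spec_segment_nones; infer_instance

-- ===== CLAIM (what is proved, stated in full; the proofs are below) =====
def Claim_equal_segment_nones : Prop := ∀ (pitch : List (Option Int)), Dom_segment_nones pitch → Spec_segment_nones pitch (segment_nones pitch)

-- ===== LEMMAS AND PROOFS =====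
-- loop invariant: A's fold from a searching state (seg = [], start = true) computes pvAltOuter,
-- and from an in-run state (seg = [i0], start = false) computes pvAltInner
theorem pvFold_inv (rest : List (Option Int)) :
    ∀ (s : Int) (segs : List (List Int)),
      (((PySem.List.enumerate rest s).foldl pvStepA (segs, [], true)).1
          = segs ++ pvAltOuter rest s)
      ∧ ∀ i0 : Int,
        (((PySem.List.enumerate rest s).foldl pvStepA (segs, [i0], false)).1
          = segs ++ pvAltInner rest s i0) := by
  induction rest with
  | nil => intro s segs; simp [PySem.List.enumerate_nil, pvAltOuter, pvAltInner]
  | cons p rest ih =>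
      intro s segs
      constructor
      · by_cases h : pvTruthy p = true
        · simp [PySem.List.enumerate_cons, pvStepA, pvAltOuter, h, (ih (s + 1) segs).2 s]
        · simp only [Bool.not_eq_true] at h
          simp [PySem.List.enumerate_cons, pvStepA, pvAltOuter, h, (ih (s + 1) segs).1]
      · intro i0
        by_cases h : pvTruthy p = true
        · simp [PySem.List.enumerate_cons, pvStepA, pvAltInner, h, (ih (s + 1) segs).2 i0]
        · simp only [Bool.not_eq_true] at h
          simp [PySem.List.enumerate_cons, pvStepA, pvAltInner, h,
            (ih (s + 1) (segs ++ [[i0, s]])).1]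

-- ===== VERDICT (by name: the statement is the Claim_ definition above) =====
theorem segment_nones_spec : Claim_equal_segment_nones := by
  intro pitch _
  unfold Spec_segment_nones segment_nones segment_nones_alt
  simpa using (pvFold_inv pitch 0 []).1
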